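-- pv_equiv track=rewrite | github.com/Norton-Lin/test_python | test2.py | check_brackets
-- ===== SOURCE A (Python) =====
-- def check_brackets(s):
--     stack = []
--     ans = []
--     for i in range(len(s)):
--         if s[i] == "(":
--             stack.append(i)
--             ans.append(" ")
--         elif s[i] == ")":
--             if stack:
--                 stack.pop()
--                 ans.append(" ")
--             else:
--                 ans.append("?")
--         else:
--             ans += " "
--     for i in stack:
--         ans[i] = "x"
--     return "".join(ans)
--
-- ans = []
-- ===== SOURCE B (Python) =====
-- def check_brackets(s):
--     n = len(s)
--     res = [" "] * n
--     bal = 0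
--     for i in range(n):
--         c = s[i]
--         if c == "(":
--             bal += 1
--         elif c == ")":
--             if bal > 0:
--                 bal -= 1
--             else:
--                 res[i] = "?"
--     bal = 0
--     for i in range(n - 1, -1, -1):
--         c = s[i]
--         if c == ")":
--             bal += 1
--         elif c == "(":
--             if bal > 0:
--                 bal -= 1
--             else:
--                 res[i] = "x"
--     return "".join(res)
-- ===== Notes on version B (the rewrite author's own statement) =====
-- stated objective: alternative
-- what changed: Replaced the index stack plus final fixup loop by two counter passes over a prefilled array of spaces: a left-to-right pass with an open-balance marking unmatched closing brackets, and a right-to-left pass with a close-balance marking unmatched opening brackets.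
import Mathlib
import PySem

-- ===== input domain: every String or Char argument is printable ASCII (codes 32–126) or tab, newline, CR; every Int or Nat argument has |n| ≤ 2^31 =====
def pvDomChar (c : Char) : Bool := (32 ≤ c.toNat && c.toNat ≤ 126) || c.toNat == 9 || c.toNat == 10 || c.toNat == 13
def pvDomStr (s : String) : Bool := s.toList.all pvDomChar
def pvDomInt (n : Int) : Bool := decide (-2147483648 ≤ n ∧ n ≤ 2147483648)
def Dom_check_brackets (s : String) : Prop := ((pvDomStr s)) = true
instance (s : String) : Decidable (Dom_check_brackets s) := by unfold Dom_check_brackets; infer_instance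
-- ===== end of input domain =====

-- ===== PORT A =====
-- B replaces A's index stack and final fixup loop by two counter passes; no speed claim.

-- A's forward loop: state (stack of indices, ans chars appended)
def loopA : List Char → Nat → List Nat → List Char → List Nat × List Char
  | [], _, stack, ans => (stack, ans)
  | c :: cs, i, stack, ans =>
    if c = '(' then loopA cs (i + 1) (stack ++ [i]) (ans ++ [' '])
    else if c = ')' then
      if stack ≠ [] then loopA cs (i + 1) stack.dropLast (ans ++ [' '])
      else loopA cs (i + 1) stack (ans ++ ['?'])
    else loopA cs (i + 1) stack (ans ++ [' '])

def check_brackets (s : String) : String :=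
  match loopA s.toList 0 [] [] with
  | (stack, ans) => String.ofList (stack.foldl (fun a i => a.set i 'x') ans)

-- ===== PORT B =====
-- first pass: left to right, open-balance; res[i] is ' ' except '?' at unmatched ')'
def passB1 : List Char → Nat → List Char
  | [], _ => []
  | c :: cs, bal =>
    if c = '(' then ' ' :: passB1 cs (bal + 1)
    else if c = ')' then
      if bal > 0 then ' ' :: passB1 cs (bal - 1) else '?' :: passB1 cs bal
    else ' ' :: passB1 cs bal

-- second pass: right to left (structural foldr-style), close-balance; marks 'x' at unmatched '('
def passB2 : List Char → List Char → Nat × List Char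
  | c :: cs, r :: rs =>
    let p := passB2 cs rs
    if c = ')' then (p.1 + 1, r :: p.2)
    else if c = '(' then
      if p.1 > 0 then (p.1 - 1, r :: p.2) else (p.1, 'x' :: p.2)
    else (p.1, r :: p.2)
  | _, _ => (0, [])

def check_brackets_alt (s : String) : String :=
  String.ofList (passB2 s.toList (passB1 s.toList 0)).2

-- ===== PRECONDITION & SPEC =====
def Spec_check_brackets (s : String) (out : String) : Prop := out = check_brackets_alt s
instance (s : String) (out : String) : Decidable (Spec_check_brackets s out) := by unfold Spec_check_brackets; infer_instance

-- ===== CLAIM (what is proved, stated in full; the proofs are below) =====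
def Claim_equal_check_brackets : Prop := ∀ (s : String), Dom_check_brackets s → Spec_check_brackets s (check_brackets s)

-- ===== LEMMAS AND PROOFS =====

-- number of unmatched ')' in cs (closes with no '(' to their left inside cs)
def Qf : List Char → Nat
  | [] => 0
  | c :: cs => if c = ')' then Qf cs + 1 else if c = '(' then Qf cs - 1 else Qf cs

-- indices of unmatched '(' in cs, increasing
def Uf : List Char → List Nat
  | [] => []
  | c :: cs =>
    if c = '(' then
      if Qf cs = 0 then 0 :: (Uf cs).map (· + 1) else (Uf cs).map (· + 1)
    else (Uf cs).map (· + 1)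

def markAll (rs : List Char) (ps : List Nat) : List Char :=
  ps.foldl (fun a p => a.set p 'x') rs

theorem markAll_shift (ps : List Nat) (r : Char) (rs : List Char) :
    markAll (r :: rs) (ps.map (· + 1)) = r :: markAll rs ps := by
  induction ps generalizing rs with
  | nil => rfl
  | cons p ps ih => simp [markAll, List.foldl] at ih ⊢; exact ih (rs.set p 'x')

theorem passB1_eq (cs : List Char) (i : Nat) (st : List Nat) (ans : List Char) :
    (loopA cs i st ans).2 = ans ++ passB1 cs st.length := by
  induction cs generalizing i st ans with
  | nil => simp [loopA, passB1]
  | cons c cs ih =>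
    by_cases h1 : c = '('
    · simp [loopA, passB1, h1, ih]
    · by_cases h2 : c = ')'
      · rcases st with _ | ⟨a, st⟩
        · simp [loopA, passB1, h2, ih]
        · have hlen : (List.dropLast (a :: st)).length = st.length := by
            simp [List.length_dropLast]
          simp [loopA, passB1, h2, ih, hlen]
      · simp [loopA, passB1, h1, h2, ih]

theorem passB1_length (cs : List Char) (b : Nat) : (passB1 cs b).length = cs.length := by
  induction cs generalizing b with
  | nil => rfl
  | cons c cs ih => by_cases h1 : c = '(' <;> by_cases h2 : c = ')' <;>
      simp [passB1, h1, h2, ih] <;> split <;> simp [ih]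

theorem stack_eq (cs : List Char) (i : Nat) (st : List Nat) (ans : List Char) :
    (loopA cs i st ans).1 = st.take (st.length - Qf cs) ++ (Uf cs).map (· + i) := by
  induction cs generalizing i st ans with
  | nil => simp [loopA, Qf, Uf]
  | cons c cs ih =>
    by_cases h1 : c = '('
    · rcases hq : Qf cs with _ | q
      · have ht : (st ++ [i]).take (st.length + 1) = st ++ [i] := by simp
        simp [loopA, h1, ih, Qf, Uf, hq, ht, List.map_map, Nat.add_comm 1 i]
      · have h1' : st.length + 1 - (q + 1) = st.length - q := by omega
        have h2' : st.length - q ≤ st.length := Nat.sub_le _ _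
        simp [loopA, h1, ih, Qf, Uf, hq, h1', List.take_append_of_le_length h2',
          List.map_map, Function.comp, Nat.add_assoc, Nat.add_comm 1 i]
    · by_cases h2 : c = ')'
      · rcases st with _ | ⟨a, st⟩
        · simp [loopA, h2, ih, Qf, Uf, List.map_map, Nat.add_comm 1 i]
        · have hd : (a :: st).dropLast.length = st.length := by simp
          have hsub : (a :: st).length - (Qf cs + 1) = st.length - Qf cs := by simp
          have htk : (a :: st).take (st.length - Qf cs)
              = (a :: st).dropLast.take (st.length - Qf cs) := by
            rw [List.dropLast_eq_take, List.take_take]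
            congr 1
            simp
          simp [loopA, h2, ih, Qf, Uf, hd, htk, List.map_map, Nat.add_comm 1 i]
      · simp [loopA, h1, h2, ih, Qf, Uf, List.map_map, Nat.add_comm 1 i]

theorem passB2_eq (cs rs : List Char) (h : rs.length = cs.length) :
    passB2 cs rs = (Qf cs, markAll rs (Uf cs)) := by
  induction cs generalizing rs with
  | nil =>
    rcases rs with _ | _
    · rfl
    · simp at h
  | cons c cs ih =>
    rcases rs with _ | ⟨r, rs⟩
    · simp at h
    · simp at h
      by_cases h2 : c = ')'
      · simp [passB2, h2, ih rs h, Qf, Uf, markAll_shift]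
      · by_cases h1 : c = '('
        · rcases hq : Qf cs with _ | q
          · have : markAll (r :: rs) (0 :: (Uf cs).map (· + 1))
                = 'x' :: markAll rs (Uf cs) := by
              simp [markAll, List.foldl]
              exact markAll_shift (Uf cs) 'x' rs
            simp [passB2, h1, ih rs h, Qf, Uf, hq, this]
          · simp [passB2, h1, ih rs h, Qf, Uf, hq, markAll_shift]
        · simp [passB2, h1, h2, ih rs h, Qf, Uf, markAll_shift]

-- ===== VERDICT (by name: the statement is the Claim_ definition above) =====
theorem check_brackets_spec : Claim_equal_check_brackets := by
  intro s _
  unfold Spec_check_brackets check_brackets check_brackets_alt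
  have hans := passB1_eq s.toList 0 [] []
  have hst := stack_eq s.toList 0 [] []
  rw [passB2_eq s.toList (passB1 s.toList 0) (by simp [passB1_length])]
  rcases hE : loopA s.toList 0 [] [] with ⟨stack, ans⟩
  rw [hE] at hans hst
  simp at hans hst
  rw [hans, hst]
  rfl
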